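-- pv_equiv track=rewrite | github.com/lsngmin/px4-jetson-gazebo | common/check_preflight.py | sensor_bits_to_names
-- ===== SOURCE A (Python) =====
-- def sensor_bits_to_names(bits):
--     SENSOR_FLAGS = [
--         (0, 'GYRO'), (1, 'ACCEL'), (2, 'MAG'), (3, 'ABS_PRESSURE'), (4, 'DIFF_PRESSURE'),
--         (5, 'GPS'), (6, 'OPTICAL_FLOW'), (7, 'VISION_POSITION'), (8, 'LASER_POSITION'),
--         (9, 'EXTERNAL_GROUND_TRUTH'), (10, 'ANGULAR_RATE_CONTROL'), (11, 'ATTITUDE_STABILIZATION'),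
--         (12, 'YAW_POSITION'), (13, 'Z_ALTITUDE_CONTROL'), (14, 'XY_POSITION_CONTROL'),
--         (15, 'MOTOR_OUTPUTS'), (16, 'RC_RECEIVER'), (17, '3D_GYRO2'), (18, '3D_ACCEL2'),
--         (19, '3D_MAG2'), (20, 'GEOFENCE'), (21, 'AHRS'), (22, 'TERRAIN'), (23, 'REVERSE_MOTOR'),
--         (24, 'LOGGING'), (25, 'BATTERY'), (26, 'PROXIMITY'), (27, 'SATCOM'), (28, 'PRECLAND'),
--         (29, 'OBSTACLE_AVOIDANCE'), (30, 'PROP_ENC'), (31, 'UNKNOWN31')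
--     ]
--     return [name for i, name in SENSOR_FLAGS if bits & (1 << i)]
-- ===== SOURCE B (Python) =====
-- def sensor_bits_to_names(bits):
--     NAMES = [
--         'GYRO', 'ACCEL', 'MAG', 'ABS_PRESSURE', 'DIFF_PRESSURE',
--         'GPS', 'OPTICAL_FLOW', 'VISION_POSITION', 'LASER_POSITION',
--         'EXTERNAL_GROUND_TRUTH', 'ANGULAR_RATE_CONTROL', 'ATTITUDE_STABILIZATION',
--         'YAW_POSITION', 'Z_ALTITUDE_CONTROL', 'XY_POSITION_CONTROL',
--         'MOTOR_OUTPUTS', 'RC_RECEIVER', '3D_GYRO2', '3D_ACCEL2',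
--         '3D_MAG2', 'GEOFENCE', 'AHRS', 'TERRAIN', 'REVERSE_MOTOR',
--         'LOGGING', 'BATTERY', 'PROXIMITY', 'SATCOM', 'PRECLAND',
--         'OBSTACLE_AVOIDANCE', 'PROP_ENC', 'UNKNOWN31'
--     ]
--     out = []
--     masked = bits & 0xFFFFFFFF  # low 32 bits, exactly the bits A's per-entry tests can see
--     while masked:
--         low = masked & -masked            # lowest set bit, a power of two
--         out.append(NAMES[low.bit_length() - 1])
--         masked -= low                     # clear that bit
--     return out
-- ===== Notes on version B (the rewrite author's own statement) =====
-- stated objective: alternative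
-- what changed: A scans the whole thirty-two-entry (bit,name) table testing bits & (1 << i) for every entry; B masks bits once and then iterates only over the SET bits of the masked value, extracting each lowest set bit with masked & -masked, finding the name index from its bit_length, and clearing the bit, so the loop runs once per set bit.
import Mathlib
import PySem

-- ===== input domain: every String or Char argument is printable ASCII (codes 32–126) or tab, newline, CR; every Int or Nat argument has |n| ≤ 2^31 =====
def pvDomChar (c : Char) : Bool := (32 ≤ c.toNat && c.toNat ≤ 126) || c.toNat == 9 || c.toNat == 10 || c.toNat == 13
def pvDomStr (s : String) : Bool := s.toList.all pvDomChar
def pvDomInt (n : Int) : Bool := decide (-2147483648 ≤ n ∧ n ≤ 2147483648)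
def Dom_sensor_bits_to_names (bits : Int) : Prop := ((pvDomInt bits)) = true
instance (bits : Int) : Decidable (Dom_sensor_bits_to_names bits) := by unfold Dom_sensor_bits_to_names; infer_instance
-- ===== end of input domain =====

-- B replaces A's 32-entry table scan by a loop over the SET bits of the masked value only
-- (lowest set bit via masked & -masked, name index via bit_length, bit cleared each step);
-- same return value, no speed claim.

-- ===== PORT A =====
-- the SENSOR_FLAGS table of A, (bit index, name)
def pvFlagsA : List (Nat × String) := [
   (0, "GYRO"), (1, "ACCEL"), (2, "MAG"), (3, "ABS_PRESSURE"), (4, "DIFF_PRESSURE"),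
   (5, "GPS"), (6, "OPTICAL_FLOW"), (7, "VISION_POSITION"), (8, "LASER_POSITION"),
   (9, "EXTERNAL_GROUND_TRUTH"), (10, "ANGULAR_RATE_CONTROL"), (11, "ATTITUDE_STABILIZATION"),
   (12, "YAW_POSITION"), (13, "Z_ALTITUDE_CONTROL"), (14, "XY_POSITION_CONTROL"),
   (15, "MOTOR_OUTPUTS"), (16, "RC_RECEIVER"), (17, "3D_GYRO2"), (18, "3D_ACCEL2"),
   (19, "3D_MAG2"), (20, "GEOFENCE"), (21, "AHRS"), (22, "TERRAIN"), (23, "REVERSE_MOTOR"),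
   (24, "LOGGING"), (25, "BATTERY"), (26, "PROXIMITY"), (27, "SATCOM"), (28, "PRECLAND"),
   (29, "OBSTACLE_AVOIDANCE"), (30, "PROP_ENC"), (31, "UNKNOWN31")]

-- literal port of A: [name for i, name in SENSOR_FLAGS if bits & (1 << i)]
def sensor_bits_to_names (bits : Int) : List String :=
  pvFlagsA.filterMap (fun p => if PySem.Int.band bits ((1 : Int) <<< (p.1 : Int)) ≠ 0 then some p.2 else none)

-- ===== PORT B =====
-- the NAMES table of B, in bit order
def pvNamesB : List String := [
   "GYRO", "ACCEL", "MAG", "ABS_PRESSURE", "DIFF_PRESSURE",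
   "GPS", "OPTICAL_FLOW", "VISION_POSITION", "LASER_POSITION",
   "EXTERNAL_GROUND_TRUTH", "ANGULAR_RATE_CONTROL", "ATTITUDE_STABILIZATION",
   "YAW_POSITION", "Z_ALTITUDE_CONTROL", "XY_POSITION_CONTROL",
   "MOTOR_OUTPUTS", "RC_RECEIVER", "3D_GYRO2", "3D_ACCEL2",
   "3D_MAG2", "GEOFENCE", "AHRS", "TERRAIN", "REVERSE_MOTOR",
   "LOGGING", "BATTERY", "PROXIMITY", "SATCOM", "PRECLAND",
   "OBSTACLE_AVOIDANCE", "PROP_ENC", "UNKNOWN31"]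

-- Python's & of a negative int with a natural number, on constructors (used by the termination lemma)
theorem pv_band_negSucc (n k : Nat) :
    PySem.Int.band (Int.negSucc n) (↑k) = ↑(k - (k &&& n)) := by
  simp [PySem.Int.band]

-- masked & -masked on a positive state, as a Nat computation
theorem pv_low_eq (k : Nat) (hk : 0 < k) :
    PySem.Int.band (↑k) (-(↑k : Int)) = ↑(k - (k &&& (k - 1))) := by
  have h : (-(↑k : Int)) = Int.negSucc (k - 1) := by
    rw [Int.negSucc_eq]; omega
  rw [h, PySem.Int.band_comm, pv_band_negSucc]

-- the loop state strictly decreases (cited by pvLoopB's decreasing_by)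
theorem pv_dec (m : Int) (h : 0 < m) : (m - PySem.Int.band m (-m)).toNat < m.toNat := by
  obtain ⟨k, rfl⟩ := Int.eq_ofNat_of_zero_le h.le
  have hk : 0 < k := by exact_mod_cast h
  rw [pv_low_eq k hk]
  have ht : k &&& (k - 1) ≤ k - 1 := Nat.and_le_right
  omega

-- B's while loop: `while masked: low = masked & -masked; out.append(NAMES[low.bit_length()-1]); masked -= low`
-- The guard `m ≤ 0` equals Python's `masked != 0` on every reachable state (masked = bits & 0xFFFFFFFF ≥ 0);
-- NAMES[·] is always in range here, so `.getD ""` never fires.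
def pvLoopB (m : Int) : List String :=
  if _hm : m ≤ 0 then []
  else
    ((PySem.List.pyGet? pvNamesB ((PySem.Int.bitLength (PySem.Int.band m (-m)) : Int) - 1)).getD "")
      :: pvLoopB (m - PySem.Int.band m (-m))
termination_by m.toNat
decreasing_by exact pv_dec m (by omega)

def sensor_bits_to_names_alt (bits : Int) : List String :=
  pvLoopB (PySem.Int.band bits 4294967295)

-- ===== PRECONDITION & SPEC =====
def Spec_sensor_bits_to_names (bits : Int) (out : List String) : Prop := out = sensor_bits_to_names_alt bits
instance (bits : Int) (out : List String) : Decidable (Spec_sensor_bits_to_names bits out) := by unfold Spec_sensor_bits_to_names; infer_instance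

-- ===== CLAIM (what is proved, stated in full; the proofs are below) =====
def Claim_equal_sensor_bits_to_names : Prop := ∀ (bits : Int), Dom_sensor_bits_to_names bits → Spec_sensor_bits_to_names bits (sensor_bits_to_names bits)

-- ===== LEMMAS AND PROOFS =====

-- the common characterisation both ports are reduced to: the table filtered by the bits of a Nat
def pvSpecF (m : Nat) : List String :=
  pvFlagsA.filterMap (fun p => if m.testBit p.1 then some p.2 else none)

-- the Int mask literal is the natural number 2^32 - 1
theorem pv_mask_lit : (4294967295 : Int) = ((2 ^ 32 - 1 : Nat) : Int) := by norm_num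

-- complement-by-subtraction: bits of 2^w - 1 - x are the flipped bits of x (below w)
theorem pv_compl_testBit : ∀ (w x i : Nat), x < 2 ^ w → i < w →
    (2 ^ w - 1 - x).testBit i = !x.testBit i := by
  intro w
  induction w with
  | zero => intro x i _ hi; omega
  | succ w ih =>
    intro x i hx hi
    have hpow : 2 ^ (w + 1) = 2 * 2 ^ w := by ring
    rw [hpow] at hx
    cases i with
    | zero =>
      simp only [Nat.testBit_zero]
      have h2 : (0:Nat) < 2 ^ w := Nat.two_pow_pos w
      have h1 : (2 ^ (w + 1) - 1 - x) % 2 = 1 - x % 2 := by rw [hpow]; omega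
      rcases Nat.mod_two_eq_zero_or_one x with h | h <;> simp [h, h1]
    | succ i =>
      rw [Nat.testBit_succ, Nat.testBit_succ]
      have h2 : (0:Nat) < 2 ^ w := Nat.two_pow_pos w
      have hdiv : (2 ^ (w + 1) - 1 - x) / 2 = 2 ^ w - 1 - x / 2 := by rw [hpow]; omega
      rw [hdiv]
      exact ih (x / 2) i (by omega) (by omega)

-- the masked value is a natural number
theorem pv_masked_eq (bits : Int) :
    PySem.Int.band bits 4294967295 = (((PySem.Int.band bits 4294967295).toNat : Nat) : Int) := by
  have h : (0:Int) ≤ PySem.Int.band bits 4294967295 := by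
    rw [PySem.Int.band_comm]
    exact PySem.Int.band_nonneg_of_nonneg_left _ (by norm_num)
  exact (Int.toNat_of_nonneg h).symm

-- and it is below 2^32
theorem pv_masked_lt (bits : Int) : (PySem.Int.band bits 4294967295).toNat < 2 ^ 32 := by
  rw [pv_mask_lit]
  rcases bits with a | n
  · rw [Int.ofNat_eq_natCast, PySem.Int.band_natCast, Int.toNat_natCast]
    have := Nat.and_le_right (n := a) (m := 2 ^ 32 - 1)
    omega
  · rw [pv_band_negSucc, Int.toNat_natCast]
    omega

-- A's per-bit test equals bit i of the masked value, for i < 32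
theorem condA (bits : Int) (i : Nat) (hi : i < 32) :
    (PySem.Int.band bits ((1 : Int) <<< (i : Int)) ≠ 0) ↔
      ((PySem.Int.band bits 4294967295).toNat.testBit i = true) := by
  rw [Int.one_shiftLeft, pv_mask_lit]
  rcases bits with a | n
  · rw [Int.ofNat_eq_natCast, PySem.Int.band_natCast, PySem.Int.band_natCast]
    rw [Int.toNat_natCast]
    rw [Nat.and_two_pow_sub_one_eq_mod, Nat.and_two_pow]
    rw [Nat.testBit_mod_two_pow]
    have := Nat.two_pow_pos i
    cases hb : a.testBit i
    · simp
    · simp [hi]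
  · rw [pv_band_negSucc, pv_band_negSucc]
    rw [Int.toNat_natCast]
    rw [Nat.and_comm (2 ^ i) n, Nat.and_two_pow]
    rw [Nat.and_comm (2 ^ 32 - 1) n, Nat.and_two_pow_sub_one_eq_mod]
    have hlt : n % 2 ^ 32 < 2 ^ 32 := Nat.mod_lt _ (Nat.two_pow_pos 32)
    rw [pv_compl_testBit 32 (n % 2 ^ 32) i hlt hi]
    rw [Nat.testBit_mod_two_pow]
    have := Nat.two_pow_pos i
    cases hb : n.testBit i
    · simp [hi]
    · simp [hi]

-- A's filter over the table equals the testBit characterisation of the masked value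
theorem pv_A_eq (bits : Int) :
    sensor_bits_to_names bits = pvSpecF (PySem.Int.band bits 4294967295).toNat := by
  unfold sensor_bits_to_names pvSpecF
  apply List.filterMap_congr
  intro p hp
  have h32 : ∀ q ∈ pvFlagsA, q.1 < 32 := by decide
  have hi := h32 p hp
  by_cases h : (PySem.Int.band bits 4294967295).toNat.testBit p.1 = true
  · rw [if_pos ((condA bits p.1 hi).mpr h), if_pos h]
  · rw [if_neg (fun hc => h ((condA bits p.1 hi).mp hc)), if_neg h]

-- m & (m-1): clearing the lowest set bit, with all its bit-level facts, by parity induction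
theorem pv_double_and (k : Nat) (hk : 0 < k) : (2 * k) &&& (2 * k - 1) = 2 * (k &&& (k - 1)) := by
  apply Nat.eq_of_testBit_eq
  intro j
  cases j with
  | zero =>
    simp only [Nat.testBit_zero]
    have h1 : (2 * k) % 2 = 0 := by omega
    have h2 : (2 * (k &&& (k - 1))) % 2 = 0 := by omega
    simp [h1, h2]
  | succ j =>
    rw [Nat.testBit_succ, Nat.testBit_succ, Nat.and_div_two,
        show 2 * k / 2 = k by omega, show (2 * k - 1) / 2 = k - 1 by omega,
        show 2 * (k &&& (k - 1)) / 2 = k &&& (k - 1) by omega]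

theorem pv_odd_and (k : Nat) : (2 * k + 1) &&& (2 * k) = 2 * k := by
  apply Nat.eq_of_testBit_eq
  intro j
  cases j with
  | zero =>
    simp only [Nat.testBit_zero]
    have h1 : (2 * k) % 2 = 0 := by omega
    simp [h1]
  | succ j =>
    rw [Nat.testBit_succ, Nat.testBit_succ, Nat.and_div_two,
        show (2 * k + 1) / 2 = k by omega, show 2 * k / 2 = k by omega, Nat.and_self]

theorem pv_lowbit (m : Nat) (hm : 0 < m) : ∃ i,
    m - (m &&& (m - 1)) = 2 ^ i ∧ m.testBit i = true ∧ (∀ j, j < i → m.testBit j = false) ∧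
    (m &&& (m - 1)).testBit i = false ∧ (∀ j, j ≠ i → (m &&& (m - 1)).testBit j = m.testBit j) := by
  induction m using Nat.strong_induction_on with
  | _ m ih =>
    rcases Nat.even_or_odd m with ⟨k, hk⟩ | ⟨k, hk⟩
    · -- m = 2k even, k > 0
      have hk0 : 0 < k := by omega
      have hkm : k < m := by omega
      obtain ⟨i, e1, e2, e3, e4, e5⟩ := ih k hkm hk0
      have hand : m &&& (m - 1) = 2 * (k &&& (k - 1)) := by
        rw [show m = 2 * k by omega]; exact pv_double_and k hk0
      refine ⟨i + 1, ?_, ?_, ?_, ?_, ?_⟩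
      · rw [hand]
        have : k &&& (k - 1) ≤ k - 1 := Nat.and_le_right
        have : 2 ^ (i + 1) = 2 * 2 ^ i := by ring
        omega
      · rw [Nat.testBit_succ, show m / 2 = k by omega]; exact e2
      · intro j hj
        cases j with
        | zero => simp only [Nat.testBit_zero, decide_eq_false_iff_not]; omega
        | succ j =>
          rw [Nat.testBit_succ, show m / 2 = k by omega]
          exact e3 j (by omega)
      · rw [hand, Nat.testBit_succ, show 2 * (k &&& (k - 1)) / 2 = k &&& (k - 1) by omega]
        exact e4
      · intro j hj
        cases j with
        | zero =>
          rw [hand]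
          simp only [Nat.testBit_zero]
          have h1 : (2 * (k &&& (k - 1))) % 2 = 0 := by omega
          have h2 : m % 2 = 0 := by omega
          simp [h1, h2]
        | succ j =>
          rw [hand, Nat.testBit_succ, Nat.testBit_succ,
              show 2 * (k &&& (k - 1)) / 2 = k &&& (k - 1) by omega, show m / 2 = k by omega]
          exact e5 j (by omega)
    · -- m = 2k + 1 odd
      have hand : m &&& (m - 1) = 2 * k := by
        rw [show m = 2 * k + 1 by omega]
        simpa using pv_odd_and k
      refine ⟨0, ?_, ?_, ?_, ?_, ?_⟩
      · rw [hand]; omega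
      · simp only [Nat.testBit_zero, decide_eq_true_eq]; omega
      · intro j hj; omega
      · rw [hand]; simp only [Nat.testBit_zero, decide_eq_false_iff_not]; omega
      · intro j hj
        cases j with
        | zero => omega
        | succ j =>
          rw [hand, Nat.testBit_succ, Nat.testBit_succ,
              show 2 * k / 2 = k by omega, show m / 2 = k by omega]

-- bit_length of a power of two
theorem pv_bitLength_pow (i : Nat) : PySem.Int.bitLength ((2 ^ i : Nat) : Int) = i + 1 := by
  have hpos : ((2 ^ i : Nat) : Int) ≠ 0 := by positivity
  have h1 := PySem.Int.lt_two_pow_bitLength ((2 ^ i : Nat) : Int)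
  have h2 := PySem.Int.two_pow_bitLength_le ((2 ^ i : Nat) : Int) hpos
  rw [Int.natAbs_natCast] at h1 h2
  have hlt : i < PySem.Int.bitLength ((2 ^ i : Nat) : Int) :=
    (Nat.pow_lt_pow_iff_right (by norm_num)).mp h1
  have hle : PySem.Int.bitLength ((2 ^ i : Nat) : Int) - 1 ≤ i :=
    (Nat.pow_le_pow_iff_right (by norm_num)).mp h2
  omega

-- filtering with the lowest set bit cleared drops exactly that bit's name (fs index-sorted)
theorem pv_split (fs : List (Nat × String)) (m t i : Nat) (name : String)
    (hsort : fs.Pairwise (fun a b => a.1 < b.1))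
    (hmem : (i, name) ∈ fs)
    (hmi : m.testBit i = true) (hti : t.testBit i = false)
    (hlow : ∀ j, j < i → m.testBit j = false)
    (hoth : ∀ j, j ≠ i → t.testBit j = m.testBit j) :
    fs.filterMap (fun p => if m.testBit p.1 then some p.2 else none)
      = name :: fs.filterMap (fun p => if t.testBit p.1 then some p.2 else none) := by
  induction fs with
  | nil => cases hmem
  | cons a rest ih =>
    rw [List.pairwise_cons] at hsort
    rcases List.mem_cons.mp hmem with h | hmem'
    · subst h
      simp only [List.filterMap_cons, hmi, hti]
      simp
      apply List.filterMap_congr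
      intro p hp
      have hgt : i < p.1 := hsort.1 p hp
      rw [hoth p.1 (by omega)]
    · have hlt : a.1 < i := hsort.1 _ hmem'
      have hma : m.testBit a.1 = false := hlow a.1 hlt
      have hta : t.testBit a.1 = false := by rw [hoth a.1 (by omega)]; exact hma
      simp only [List.filterMap_cons, hma, hta]
      simp
      exact ih hsort.2 hmem'
    
-- every bit index 0..31 is an entry of A's table with B's name
theorem pv_table_mem : ∀ i, i < 32 → (i, pvNamesB[i]?.getD "") ∈ pvFlagsA := by
  decide

-- a set bit of a value below 2^32 has index below 32
theorem pv_bit_lt (k i : Nat) (hk : k < 2 ^ 32) (hb : k.testBit i = true) : i < 32 := by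
  by_contra h
  have : k < 2 ^ i := lt_of_lt_of_le hk (Nat.pow_le_pow_right (by norm_num) (by omega))
  rw [Nat.testBit_lt_two_pow this] at hb
  exact Bool.noConfusion hb

-- B's loop computes the testBit characterisation
theorem pv_B_eq (k : Nat) (hk : k < 2 ^ 32) : pvLoopB (↑k) = pvSpecF k := by
  induction k using Nat.strong_induction_on with
  | _ k ih =>
    by_cases hk0 : k = 0
    · subst hk0
      rw [pvLoopB]
      rw [dif_pos (by norm_num)]
      decide
    · have hpos : 0 < k := Nat.pos_of_ne_zero hk0
      obtain ⟨i, e1, e2, e3, e4, e5⟩ := pv_lowbit k hpos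
      have hi32 : i < 32 := pv_bit_lt k i hk e2
      have htle : k &&& (k - 1) ≤ k - 1 := Nat.and_le_right
      rw [pvLoopB]
      rw [dif_neg (by omega : ¬ ((k : Int) ≤ 0))]
      rw [pv_low_eq k hpos, e1, pv_bitLength_pow]
      rw [show ((i + 1 : Nat) : Int) - 1 = ((i : Nat) : Int) by omega]
      rw [PySem.List.pyGet?_natCast]
      have hck : k &&& (k - 1) ≤ k := le_trans htle (Nat.sub_le _ _)
      have hsub : (↑k : Int) - ((2 ^ i : Nat) : Int) = ((k &&& (k - 1) : Nat) : Int) := by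
        rw [← e1, Nat.cast_sub hck]; ring
      rw [hsub]
      rw [ih (k &&& (k - 1)) (by omega) (by omega)]
      exact (pv_split pvFlagsA k (k &&& (k - 1)) i _ (by decide) (pv_table_mem i hi32) e2 e4 e3 e5).symm

-- the two ports agree on every input
theorem pv_main (bits : Int) : sensor_bits_to_names bits = sensor_bits_to_names_alt bits := by
  rw [pv_A_eq]
  unfold sensor_bits_to_names_alt
  rw [pv_masked_eq bits]
  rw [pv_B_eq _ (pv_masked_lt bits), Int.toNat_natCast]

-- ===== VERDICT (by name: the statement is the Claim_ definition above) =====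
theorem sensor_bits_to_names_spec : Claim_equal_sensor_bits_to_names := by
  intro bits _
  unfold Spec_sensor_bits_to_names
  exact pv_main bits
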